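-- pv_equiv track=rewrite | github.com/mwalker/prov-api-harvester | prov-api-track.py | normalise_keys
-- ===== SOURCE A (Python) =====
-- def normalise_keys(docs):
--     """
--     Normalize the keys across all documents to ensure consistent structure and order.
--
--     Args:
--         docs (list): List of dictionaries representing documents.
--
--     Returns:
--         list: List of dictionaries with normalized and alphabetically sorted keys.
--     """
--     all_keys = set()
--     for doc in docs:
--         all_keys.update(doc.keys())
--
--     sorted_keys = sorted(all_keys)
--
--     normalised_docs = []
--     for doc in docs:
--         normalised_doc = {key: doc.get(key, None) for key in sorted_keys}
--         normalised_docs.append(normalised_doc)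
--
--     return normalised_docs
-- ===== SOURCE B (Python) =====
-- def _merge_unique(xs, ys):
--     """Merge two strictly increasing lists into one strictly increasing list."""
--     out = []
--     i = j = 0
--     while i < len(xs) and j < len(ys):
--         if xs[i] < ys[j]:
--             out.append(xs[i]); i += 1
--         elif ys[j] < xs[i]:
--             out.append(ys[j]); j += 1
--         else:
--             out.append(xs[i]); i += 1; j += 1
--     out.extend(xs[i:])
--     out.extend(ys[j:])
--     return out
--
--
-- def normalise_keys(docs):
--     """
--     Normalize the keys across all documents to ensure consistent structure and order.
--
--     Computes the sorted key union incrementally by two-pointer merges of each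
--     document's sorted key list (no set, no global sort), then fills the output
--     column by column: for each key in order, write its value into every document.
--     """
--     sorted_keys = []
--     for doc in docs:
--         sorted_keys = _merge_unique(sorted_keys, sorted(doc))
--
--     result = [{} for _ in docs]
--     for key in sorted_keys:
--         for doc, res in zip(docs, result):
--             res[key] = doc.get(key)
--     return result
-- ===== Notes on version B (the rewrite author's own statement) =====
-- stated objective: alternative
-- what changed: A's set-union plus one global sort plus a per-document per-key get-comprehension is replaced by computing the sorted key union incrementally with two-pointer merges of each document's sorted key list (no set, no global sort) and filling the output dicts column by column (outer loop over keys, inner over documents).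
import Mathlib
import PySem

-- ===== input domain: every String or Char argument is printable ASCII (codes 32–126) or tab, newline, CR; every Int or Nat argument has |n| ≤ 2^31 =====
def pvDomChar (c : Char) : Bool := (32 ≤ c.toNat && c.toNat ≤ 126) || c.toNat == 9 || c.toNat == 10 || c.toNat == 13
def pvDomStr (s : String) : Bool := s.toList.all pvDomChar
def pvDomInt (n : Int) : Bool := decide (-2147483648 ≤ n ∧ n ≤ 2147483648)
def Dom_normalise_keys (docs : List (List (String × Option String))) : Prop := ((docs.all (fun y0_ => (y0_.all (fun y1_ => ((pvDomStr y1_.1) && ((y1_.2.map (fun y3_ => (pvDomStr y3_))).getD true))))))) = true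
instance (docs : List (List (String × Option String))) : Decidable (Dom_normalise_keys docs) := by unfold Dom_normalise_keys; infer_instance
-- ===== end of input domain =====

-- B replaces A's set-union + global sort + per-doc per-key comprehension by incremental
-- two-pointer merges of each document's sorted key list and a column-major fill of the
-- outputs ('alternative' objective; same asymptotic cost).

-- ===== PORT A =====
def normalise_keys (docs : List (List (String × Option String))) : List (List (String × Option String)) :=
  let all_keys : PySem.Set String :=
    docs.foldl (fun s doc => PySem.Set.update s (PySem.Dict.mk doc).keys) PySem.Set.empty
  let sorted_keys := PySem.List.sorted all_keys (fun k => k) false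
  let normalised_docs := docs.foldl
    (fun acc doc => acc ++ [sorted_keys.map (fun key => (key, (PySem.Dict.mk doc).getD key none))]) []
  normalised_docs

-- ===== PORT B =====
-- two-pointer merge of two strictly increasing lists (Source B's _merge_unique)
def mergeUnique : List String → List String → List String
  | [], ys => ys
  | x :: xs, [] => x :: xs
  | x :: xs, y :: ys =>
    if x < y then x :: mergeUnique xs (y :: ys)
    else if y < x then y :: mergeUnique (x :: xs) ys
    else x :: mergeUnique xs ys

def normalise_keys_alt (docs : List (List (String × Option String))) : List (List (String × Option String)) :=
  let sorted_keys := docs.foldl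
    (fun sk doc => mergeUnique sk (PySem.List.sorted (PySem.Dict.mk doc).keys (fun k => k) false)) []
  let result : List (PySem.Dict String (Option String)) := docs.map (fun _ => PySem.Dict.empty)
  let result := sorted_keys.foldl
    (fun res key => (docs.zip res).map (fun p => p.2.insert key ((PySem.Dict.mk p.1).getD key none))) result
  result.map (fun d => d.items)

-- ===== PRECONDITION & SPEC =====
-- Pre_ excludes association lists with a duplicated key inside one document: they do not
-- encode any Python dict (A's declared input), so no Python input A returns on is excluded.
def Pre_normalise_keys (docs : List (List (String × Option String))) : Prop :=
  ∀ doc ∈ docs, (doc.map Prod.fst).Nodup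
instance (docs : List (List (String × Option String))) : Decidable (Pre_normalise_keys docs) := by unfold Pre_normalise_keys; infer_instance

def pvWitness_normalise_keys : (List (List (String × Option String))) :=
  [[("b", some "x"), ("a", none)], [("a", some "y")]]

def Spec_normalise_keys (docs : List (List (String × Option String))) (out : List (List (String × Option String))) : Prop := out = normalise_keys_alt docs
instance (docs : List (List (String × Option String))) (out : List (List (String × Option String))) : Decidable (Spec_normalise_keys docs out) := by unfold Spec_normalise_keys; infer_instance

-- ===== CLAIM (what is proved, stated in full; the proofs are below) =====
def Claim_equal_normalise_keys : Prop := ∀ (docs : List (List (String × Option String))), Dom_normalise_keys docs → Pre_normalise_keys docs → Spec_normalise_keys docs (normalise_keys docs)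

-- ===== LEMMAS AND PROOFS =====

lemma pv_mem_foldl_set_update (l : List (List (String × Option String))) (s : PySem.Set String) (y : String) :
    y ∈ l.foldl (fun s doc => PySem.Set.update s (PySem.Dict.mk doc).keys) s ↔
      y ∈ s ∨ ∃ d ∈ l, y ∈ d.map Prod.fst := by
  induction l generalizing s with
  | nil => simp
  | cons a t ih =>
    rw [List.foldl_cons, ih]
    simp only [PySem.Set.mem_update, PySem.Dict.keys, List.mem_cons]
    constructor
    · rintro (⟨h | h⟩ | ⟨d, hd, hy⟩)
      · exact Or.inl h
      · exact Or.inr ⟨a, Or.inl rfl, h⟩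
      · exact Or.inr ⟨d, Or.inr hd, hy⟩
    · rintro (h | ⟨d, (rfl | hd), hy⟩)
      · exact Or.inl (Or.inl h)
      · exact Or.inl (Or.inr hy)
      · exact Or.inr ⟨d, hd, hy⟩

lemma pv_nodup_foldl_set_update (l : List (List (String × Option String))) (s : PySem.Set String)
    (hs : s.Nodup) :
    (l.foldl (fun s doc => PySem.Set.update s (PySem.Dict.mk doc).keys) s).Nodup := by
  induction l generalizing s with
  | nil => exact hs
  | cons a t ih => exact ih _ (PySem.Set.nodup_update _ _ hs)

lemma pv_mem_mergeUnique (xs ys : List String) (z : String) :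
    z ∈ mergeUnique xs ys ↔ z ∈ xs ∨ z ∈ ys := by
  fun_induction mergeUnique xs ys with
  | case1 ys => simp
  | case2 x xs => simp
  | case3 x xs y ys h ih => simp [ih]; tauto
  | case4 x xs y ys h1 h2 ih => simp [ih]; tauto
  | case5 x xs y ys h1 h2 ih =>
    have hxy : x = y := le_antisymm (le_of_not_gt h2) (le_of_not_gt h1)
    subst hxy
    simp [ih]; tauto

lemma pv_pairwise_mergeUnique (xs ys : List String)
    (hx : xs.Pairwise (· < ·)) (hy : ys.Pairwise (· < ·)) :
    (mergeUnique xs ys).Pairwise (· < ·) := by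
  fun_induction mergeUnique xs ys with
  | case1 ys => exact hy
  | case2 x xs => exact hx
  | case3 x xs y ys h ih =>
    rcases List.pairwise_cons.mp hx with ⟨hxall, hx'⟩
    refine List.pairwise_cons.mpr ⟨?_, ih hx' hy⟩
    intro z hz
    rcases (pv_mem_mergeUnique _ _ _).mp hz with hz | hz
    · exact hxall z hz
    · rcases List.mem_cons.mp hz with rfl | hz
      · exact h
      · exact lt_trans h ((List.pairwise_cons.mp hy).1 z hz)
  | case4 x xs y ys h1 h2 ih =>
    rcases List.pairwise_cons.mp hy with ⟨hyall, hy'⟩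
    refine List.pairwise_cons.mpr ⟨?_, ih hx hy'⟩
    intro z hz
    rcases (pv_mem_mergeUnique _ _ _).mp hz with hz | hz
    · rcases List.mem_cons.mp hz with rfl | hz
      · exact h2
      · exact lt_trans h2 ((List.pairwise_cons.mp hx).1 z hz)
    · exact hyall z hz
  | case5 x xs y ys h1 h2 ih =>
    have hxy : x = y := le_antisymm (le_of_not_gt h2) (le_of_not_gt h1)
    subst hxy
    rcases List.pairwise_cons.mp hx with ⟨hxall, hx'⟩
    rcases List.pairwise_cons.mp hy with ⟨hyall, hy'⟩
    refine List.pairwise_cons.mpr ⟨?_, ih hx' hy'⟩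
    intro z hz
    rcases (pv_mem_mergeUnique _ _ _).mp hz with hz | hz
    · exact hxall z hz
    · exact hyall z hz

-- the merge fold is strictly increasing and holds exactly the union of the documents' keys
lemma pv_merge_fold (l : List (List (String × Option String))) (sk : List String)
    (hsk : sk.Pairwise (· < ·)) (hpre : ∀ doc ∈ l, (doc.map Prod.fst).Nodup) :
    (l.foldl (fun sk doc => mergeUnique sk (PySem.List.sorted (PySem.Dict.mk doc).keys (fun k => k) false)) sk).Pairwise (· < ·) ∧
    (∀ z, z ∈ l.foldl (fun sk doc => mergeUnique sk (PySem.List.sorted (PySem.Dict.mk doc).keys (fun k => k) false)) sk ↔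
      z ∈ sk ∨ ∃ d ∈ l, z ∈ d.map Prod.fst) := by
  induction l generalizing sk with
  | nil => exact ⟨hsk, by simp⟩
  | cons a t ih =>
    have hand : (PySem.List.sorted (PySem.Dict.mk a).keys (fun k => k) false).Pairwise (· < ·) := by
      have hperm := PySem.List.sorted_perm (PySem.Dict.mk a).keys (fun k => k) false
      have hnd : (PySem.List.sorted (PySem.Dict.mk a).keys (fun k => k) false).Nodup :=
        hperm.nodup_iff.mpr (by simpa [PySem.Dict.keys] using hpre a List.mem_cons_self)
      have hle := PySem.List.sorted_pairwise (PySem.Dict.mk a).keys (fun k => k)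
      exact (hnd.imp_of_mem (fun _ _ => id)).and hle |>.imp (fun h => lt_of_le_of_ne h.2 h.1)
    have hstep : (mergeUnique sk (PySem.List.sorted (PySem.Dict.mk a).keys (fun k => k) false)).Pairwise (· < ·) :=
      pv_pairwise_mergeUnique _ _ hsk hand
    obtain ⟨hp, hm⟩ := ih _ hstep (fun doc hd => hpre doc (List.mem_cons_of_mem _ hd))
    refine ⟨hp, fun z => ?_⟩
    rw [List.foldl_cons, hm z, pv_mem_mergeUnique, PySem.List.mem_sorted]
    simp only [PySem.Dict.keys, List.mem_cons]
    constructor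
    · rintro ((h | h) | ⟨d, hd, hz⟩)
      · exact Or.inl h
      · exact Or.inr ⟨a, Or.inl rfl, h⟩
      · exact Or.inr ⟨d, Or.inr hd, hz⟩
    · rintro (h | ⟨d, (rfl | hd), hz⟩)
      · exact Or.inl (Or.inl h)
      · exact Or.inl (Or.inr hz)
      · exact Or.inr ⟨d, hd, hz⟩

-- column-major fill over all documents = per-document fold (the transpose step)
lemma pv_transpose (keys : List String) (docs : List (List (String × Option String)))
    (f : List (String × Option String) → PySem.Dict String (Option String)) :
    keys.foldl
        (fun res key => (docs.zip res).map (fun p => p.2.insert key ((PySem.Dict.mk p.1).getD key none)))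
        (docs.map f) =
      docs.map (fun doc => keys.foldl (fun d key => d.insert key ((PySem.Dict.mk doc).getD key none)) (f doc)) := by
  induction keys generalizing f with
  | nil => rfl
  | cons k t ih =>
    rw [List.foldl_cons]
    have hz : (docs.zip (docs.map f)).map
        (fun p => p.2.insert k ((PySem.Dict.mk p.1).getD k none)) =
        docs.map (fun doc => (f doc).insert k ((PySem.Dict.mk doc).getD k none)) := by
      conv_lhs => rw [show docs.zip (docs.map f) = (docs.map id).zip (docs.map f) by rw [List.map_id]]
      rw [List.zip_map', List.map_map]
      rfl
    rw [hz, ih (fun doc => (f doc).insert k ((PySem.Dict.mk doc).getD k none))]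
    simp only [List.foldl_cons]

-- ===== VERDICT (by name: the statement is the Claim_ definition above) =====
theorem normalise_keys_spec : Claim_equal_normalise_keys := by
  intro docs _ hpre
  unfold Spec_normalise_keys normalise_keys normalise_keys_alt
  set S : PySem.Set String :=
    docs.foldl (fun s doc => PySem.Set.update s (PySem.Dict.mk doc).keys) PySem.Set.empty with hS
  set skA := PySem.List.sorted S (fun k => k) false with hskA
  set skB := docs.foldl
    (fun sk doc => mergeUnique sk (PySem.List.sorted (PySem.Dict.mk doc).keys (fun k => k) false)) [] with hskB
  obtain ⟨hBpair, hBmem⟩ := pv_merge_fold docs [] (List.Pairwise.nil) hpre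
  have hBnodup : skB.Nodup := hBpair.imp ne_of_lt
  have hSnodup : S.Nodup := pv_nodup_foldl_set_update docs PySem.Set.empty (by simp [PySem.Set.empty])
  have hperm : skB.Perm S := by
    rw [List.perm_ext_iff_of_nodup hBnodup hSnodup]
    intro a
    rw [hBmem a, pv_mem_foldl_set_update]
    simp [PySem.Set.empty]
  have hAB : skA = skB :=
    PySem.List.sorted_eq_of_perm_of_pairwise_lt _ _ _ hperm hBpair
  show docs.foldl (fun acc doc => acc ++ [skA.map (fun key => (key, (PySem.Dict.mk doc).getD key none))]) [] =
    (skB.foldl (fun res key => (docs.zip res).map (fun p => p.2.insert key ((PySem.Dict.mk p.1).getD key none)))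
      (docs.map (fun _ => PySem.Dict.empty))).map (fun d => d.items)
  -- A side: the append fold is a map
  rw [PySem.List.foldl_append_singleton_eq_map, List.nil_append]
  -- B side: transpose, then read off each document's items
  rw [pv_transpose skB docs (fun _ => PySem.Dict.empty)]
  rw [List.map_map]
  apply List.map_congr_left
  intro doc _
  have hfresh : ∀ a ∈ skB, (PySem.Dict.empty : PySem.Dict String (Option String)).contains a = false := by
    intro a _; exact PySem.Dict.contains_empty a
  have hitems := PySem.Dict.items_foldl_insert_fresh skB (fun a => a)
    (fun a => (PySem.Dict.mk doc).getD a none) PySem.Dict.empty hfresh (by simpa using hBnodup)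
  simp only [Function.comp]
  rw [hitems, hAB]
  rfl
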